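-- pv_equiv track=rewrite | github.com/hsd1503/event2vec | code_ADL/sequence2vecOneHot.py | getExistItemList
-- ===== SOURCE A (Python) =====
-- def getExistItemList(mat, itemList):
--     ndim = len(mat)
--     nitem = len(mat[0])
--
--     existItemList = []
--     existItemIndexList = []
--
--     for i in range(nitem):
--         sum_dim = 0.0
--         for j in range(ndim):
--             sum_dim = sum_dim + mat[j][i]
--
--         if sum_dim > 0:
--             existItemList.append(itemList[i])
--             existItemIndexList.append(i)
--
--     return existItemList, existItemIndexList
-- ===== SOURCE B (Python) =====
-- def getExistItemList(mat, itemList):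
--     nitem = len(mat[0])
--     # one row-major traversal building a column-sum table
--     sums = [0.0] * nitem
--     for row in mat:
--         sums = [s + x for s, x in zip(sums, row)]
--     # separate filter pass over the accumulated sums
--     existItemList = []
--     existItemIndexList = []
--     for i, s in enumerate(sums):
--         if s > 0:
--             existItemList.append(itemList[i])
--             existItemIndexList.append(i)
--     return existItemList, existItemIndexList
-- ===== Notes on version B (the rewrite author's own statement) =====
-- stated objective: alternative
-- what changed: B replaces A's per-column re-scan of the whole matrix (column-major nested loops) by one row-major traversal maintaining a column-sum table, followed by a separate filter pass over that table.
-- outside the precondition, e.g. on getExistItemList([[0, 0]], ['a']): A returns ([], []), B returns ([], [])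
import Mathlib
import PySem

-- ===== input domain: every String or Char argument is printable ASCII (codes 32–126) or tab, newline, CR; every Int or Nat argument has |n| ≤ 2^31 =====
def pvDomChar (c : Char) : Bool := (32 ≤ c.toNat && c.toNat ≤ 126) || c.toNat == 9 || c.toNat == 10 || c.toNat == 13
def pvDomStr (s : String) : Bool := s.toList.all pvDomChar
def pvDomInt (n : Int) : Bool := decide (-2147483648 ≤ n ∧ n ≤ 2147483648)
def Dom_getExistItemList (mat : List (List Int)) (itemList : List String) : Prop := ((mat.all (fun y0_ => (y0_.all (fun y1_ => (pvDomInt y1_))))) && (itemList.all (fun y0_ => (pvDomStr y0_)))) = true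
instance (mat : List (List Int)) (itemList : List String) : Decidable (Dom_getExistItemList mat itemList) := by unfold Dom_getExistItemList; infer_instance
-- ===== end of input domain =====

-- B replaces A's per-column re-scan (column-major nested loops) by one row-major traversal
-- maintaining a column-sum table plus a separate filter pass; same cost class ("alternative").

-- ===== PORT A =====
def getExistItemList (mat : List (List Int)) (itemList : List String) : List String × List Int :=
  (PySem.List.pyRange 0 (((PySem.List.pyGet? mat 0).getD []).length : Int) 1).foldl
    (fun acc i =>
      -- sum_dim: inner loop over j in range(ndim)
      if (PySem.List.pyRange 0 (mat.length : Int) 1).foldl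
           (fun s j => s + PySem.List.pyGetD (PySem.List.pyGetD mat j []) i 0) 0 > 0 then
        (acc.1 ++ [PySem.List.pyGetD itemList i ""], acc.2 ++ [i])
      else acc)
    ([], [])

-- ===== PORT B =====
def getExistItemList_alt (mat : List (List Int)) (itemList : List String) : List String × List Int :=
  -- sums: column-sum table built by one row-major traversal
  (PySem.List.enumerate
      (mat.foldl (fun s row => (s.zip row).map (fun p => p.1 + p.2))
        (List.replicate ((PySem.List.pyGet? mat 0).getD []).length 0)) 0).foldl
    (fun acc p =>
      if p.2 > 0 then
        (acc.1 ++ [PySem.List.pyGetD itemList p.1 ""], acc.2 ++ [p.1])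
      else acc)
    ([], [])

-- ===== PRECONDITION & SPEC =====
-- A raises IndexError on empty mat (mat[0]), on rows shorter than the first row (mat[j][i]),
-- and on itemList shorter than the first row when a positive column sum reaches past its end;
-- Pre_ conservatively requires itemList to cover all columns, so it also excludes some short-itemList
-- inputs on which A happens to return because no positive column indexes past the end (see cites).
def Pre_getExistItemList (mat : List (List Int)) (itemList : List String) : Prop :=
  mat ≠ [] ∧ (∀ row ∈ mat, (mat.headD []).length ≤ row.length) ∧
    (mat.headD []).length ≤ itemList.length
instance (mat : List (List Int)) (itemList : List String) : Decidable (Pre_getExistItemList mat itemList) := by unfold Pre_getExistItemList; infer_instance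

def pvWitness_getExistItemList : List (List Int) × List String :=
  ([[1, -2], [0, 3]], ["a", "b"])

def Spec_getExistItemList (mat : List (List Int)) (itemList : List String) (out : List String × List Int) : Prop := out = getExistItemList_alt mat itemList
instance (mat : List (List Int)) (itemList : List String) (out : List String × List Int) : Decidable (Spec_getExistItemList mat itemList out) := by unfold Spec_getExistItemList; infer_instance

-- ===== CLAIM (what is proved, stated in full; the proofs are below) =====
def Claim_equal_getExistItemList : Prop := ∀ (mat : List (List Int)) (itemList : List String), Dom_getExistItemList mat itemList → Pre_getExistItemList mat itemList → Spec_getExistItemList mat itemList (getExistItemList mat itemList)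

-- ===== LEMMAS AND PROOFS =====

-- B's accumulated column-sum table, characterised entrywise.
theorem zip_add_foldl (mat : List (List Int)) (s0 : List Int)
    (h : ∀ row ∈ mat, s0.length ≤ row.length) :
    mat.foldl (fun s row => (s.zip row).map (fun p => p.1 + p.2)) s0
      = (List.range s0.length).map
          (fun k => mat.foldl (fun a row => a + row.getD k 0) (s0.getD k 0)) := by
  induction mat generalizing s0 with
  | nil =>
    simp [List.foldl]
    exact (List.ext_getElem (by simp) (fun k h1 h2 => by simp [List.getElem?_eq_getElem h2])).symm
  | cons row rest ih =>
    have hlen : s0.length ≤ row.length := h row (by simp)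
    have hlen' : ((s0.zip row).map (fun p => p.1 + p.2)).length = s0.length := by
      simp [Nat.min_eq_left hlen]
    simp only [List.foldl_cons]
    rw [ih _ (by intro r hr; rw [hlen']; exact h r (by simp [hr]))]
    rw [hlen']
    apply List.map_congr_left
    intro k hk
    rw [List.mem_range] at hk
    congr 1
    have hk2 : k < row.length := lt_of_lt_of_le hk hlen
    simp [List.getD, List.getElem?_eq_getElem hk,
      List.getElem?_eq_getElem hk2, List.getElem?_eq_getElem (by simpa [Nat.min_eq_left hlen] : k < ((s0.zip row).map (fun p => p.1 + p.2)).length)]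

theorem getExistItemList_spec_aux (mat : List (List Int)) (itemList : List String)
    (hpre : Pre_getExistItemList mat itemList) :
    getExistItemList mat itemList = getExistItemList_alt mat itemList := by
  obtain ⟨hne, hrows, _⟩ := hpre
  obtain ⟨r0, rest, rfl⟩ := List.exists_cons_of_ne_nil hne
  set mat := r0 :: rest with hmat
  have hhead : (PySem.List.pyGet? mat 0).getD [] = r0 := by
    simp [hmat]
  set n : Nat := r0.length with hn
  have hrows' : ∀ row ∈ mat, n ≤ row.length := by
    intro row hr; simpa [hn] using hrows row hr
  unfold getExistItemList getExistItemList_alt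
  rw [hhead]
  -- rewrite B's sums table
  have hsums := zip_add_foldl mat (List.replicate n 0) (by
    intro row hr; simpa using hrows' row hr)
  simp only [List.length_replicate] at hsums
  rw [hsums]
  -- enumerate of the table as a map over pyRange
  have hrange : (List.range n).map
        (fun k => mat.foldl (fun a row => a + row.getD k 0) ((List.replicate n (0:Int)).getD k 0))
      = (List.range n).map (fun k => mat.foldl (fun a row => a + row.getD k 0) 0) := by
    apply List.map_congr_left
    intro k hk
    rw [List.mem_range] at hk
    simp [List.getD, List.getElem?_eq_getElem (by simpa : k < (List.replicate n (0:Int)).length)]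
  rw [hrange]
  set g : Nat → Int := fun k => mat.foldl (fun a row => a + row.getD k 0) 0 with hg
  rw [PySem.List.enumerate_eq_map_pyRange ((List.range n).map g) 0]
  have hlen : PySem.List.len ((List.range n).map g) = (n : Int) := by simp
  rw [hlen, List.foldl_map, hn]
  -- both sides: fold over pyRange 0 n 1
  apply PySem.List.foldl_congr_mem
  intro acc i hi
  rw [PySem.List.mem_pyRange_one] at hi
  obtain ⟨hi0, hin⟩ := hi
  have hk : i.toNat < n := by omega
  have hcast : (i.toNat : Int) = i := by omega
  -- B's table entry at i
  have hB : PySem.List.pyGetD ((List.range n).map g) i 0 = g i.toNat := by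
    rw [PySem.List.pyGetD_eq_getElem _ _ hi0 (by simp; omega)]
    simp
  -- A's inner column sum
  have hA : (PySem.List.pyRange 0 (mat.length : Int) 1).foldl
      (fun s j => s + PySem.List.pyGetD (PySem.List.pyGetD mat j []) i 0) 0
      = g i.toNat := by
    rw [PySem.List.foldl_pyRange_zero_pyGetD' mat []
      (fun s row => s + PySem.List.pyGetD row i 0) 0]
    rw [hg]
    apply PySem.List.foldl_congr_mem
    intro a row hr
    congr 1
    rw [PySem.List.pyGetD_eq_getElem _ _ hi0
      (by have := hrows' row hr; simp; omega)]
    have : i.toNat < row.length := lt_of_lt_of_le hk (hrows' row hr)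
    simp [List.getD, List.getElem?_eq_getElem this]
  rw [hA, ← hn, hB]

-- ===== VERDICT (by name: the statement is the Claim_ definition above) =====
theorem getExistItemList_spec : Claim_equal_getExistItemList := by
  intro mat itemList _ hpre
  exact getExistItemList_spec_aux mat itemList hpre
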